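-- pv_equiv track=rewrite | github.com/lucianoscarpaci/Technical-Interview-Prep-CP | Unit4/PartA/p7.py | validate_nft_actions
-- ===== SOURCE A (Python) =====
-- def validate_nft_actions(actions):
--     counter = 0
--     for action in actions:
--         if action == "add":
--             counter += 1
--         elif action == "remove":
--             if counter == 0:
--                 return False
--             counter -= 1
--     return counter == 0
-- ===== SOURCE B (Python) =====
-- def validate_nft_actions(actions):
--     prefix = []
--     total = 0
--     for a in actions:
--         total += 1 if a == "add" else -1 if a == "remove" else 0
--         prefix.append(total)
--     if not prefix:
--         return True
--     return prefix[-1] == 0 and min(prefix) >= 0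
-- ===== Notes on version B (the rewrite author's own statement) =====
-- stated objective: alternative
-- what changed: B builds the full running-balance prefix-sum table from per-action deltas, then decides by checking the final sum is 0 and the minimum prefix is non-negative, instead of A's single threaded counter with per-element branching and an early return.
import Mathlib
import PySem

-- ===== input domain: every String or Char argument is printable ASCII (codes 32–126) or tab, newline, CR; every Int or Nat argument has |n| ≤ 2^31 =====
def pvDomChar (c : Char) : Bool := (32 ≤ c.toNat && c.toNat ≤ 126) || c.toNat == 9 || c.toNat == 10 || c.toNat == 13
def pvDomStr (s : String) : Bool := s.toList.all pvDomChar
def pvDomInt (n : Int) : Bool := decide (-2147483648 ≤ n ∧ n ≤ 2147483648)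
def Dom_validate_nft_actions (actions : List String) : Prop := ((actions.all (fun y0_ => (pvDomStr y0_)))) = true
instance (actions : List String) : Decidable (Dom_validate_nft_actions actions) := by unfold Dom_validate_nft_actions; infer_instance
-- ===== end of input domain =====

-- B builds the whole prefix-sum table of ±1 deltas and checks last = 0 and min ≥ 0; same cost, different decomposition.

-- ===== PORT A =====
-- the for-loop over actions with the early `return False`, threading `counter`
def pvGoA (c : Int) : List String → Bool
  | [] => c == 0
  | a :: rest =>
    if a = "add" then pvGoA (c + 1) rest
    else if a = "remove" then
      if c = 0 then false else pvGoA (c - 1) rest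
    else pvGoA c rest

def validate_nft_actions (actions : List String) : Bool := pvGoA 0 actions

-- ===== PORT B =====
-- the per-action delta of Source B's conditional expression
def pvDelta (a : String) : Int := if a = "add" then 1 else if a = "remove" then -1 else 0

-- Source B's accumulation loop: the list of running totals
def pvAcc (s : Int) : List String → List Int
  | [] => []
  | a :: rest => (s + pvDelta a) :: pvAcc (s + pvDelta a) rest

def validate_nft_actions_alt (actions : List String) : Bool :=
  let pf := pvAcc 0 actions
  match pf with
  | [] => true
  | p :: ps => ((p :: ps).getLastD 0 == 0) && decide (0 ≤ ps.foldl min p)  -- prefix[-1] == 0 and min(prefix) >= 0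

-- ===== PRECONDITION & SPEC =====
def Spec_validate_nft_actions (actions : List String) (out : Bool) : Prop := out = validate_nft_actions_alt actions
instance (actions : List String) (out : Bool) : Decidable (Spec_validate_nft_actions actions out) := by unfold Spec_validate_nft_actions; infer_instance

-- ===== CLAIM (what is proved, stated in full; the proofs are below) =====
def Claim_equal_validate_nft_actions : Prop := ∀ (actions : List String), Dom_validate_nft_actions actions → Spec_validate_nft_actions actions (validate_nft_actions actions)

-- ===== LEMMAS AND PROOFS =====

theorem pvAcc_getLastD (l : List String) : ∀ (c d : Int), l ≠ [] →
    (pvAcc c l).getLastD d = c + (l.map pvDelta).sum := by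
  induction l with
  | nil => intro _ _ h; exact absurd rfl h
  | cons a rest ih =>
    intro c d _
    cases rest with
    | nil => simp [pvAcc]
    | cons b t =>
      have h1 : pvAcc c (a :: b :: t) = (c + pvDelta a) :: pvAcc (c + pvDelta a) (b :: t) := rfl
      rw [h1, List.getLastD_cons, ih (c + pvDelta a) (c + pvDelta a) (by simp)]
      simp only [List.map_cons, List.sum_cons]
      ring

theorem foldl_min_nonneg (ps : List Int) : ∀ (p : Int),
    (0 ≤ ps.foldl min p) ↔ (0 ≤ p ∧ ∀ x ∈ ps, 0 ≤ x) := by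
  induction ps with
  | nil => simp
  | cons x t ih =>
    intro p
    simp only [List.foldl_cons, ih (min p x), le_min_iff, List.mem_cons, forall_eq_or_imp]
    tauto

theorem pvGoA_key (l : List String) : ∀ (c : Int), 0 ≤ c →
    pvGoA c l = ((pvAcc c l).all (fun p => decide (0 ≤ p)) && (c + (l.map pvDelta).sum == 0)) := by
  induction l with
  | nil => intro c _; simp [pvGoA, pvAcc]
  | cons a rest ih =>
    intro c hc
    by_cases ha : a = "add"
    · simp only [pvGoA, ha, pvAcc, pvDelta, List.all_cons, List.map_cons,
        List.sum_cons]
      simp [ih (c + 1) (by omega : (0:Int) ≤ c + 1), show (0:Int) ≤ c + 1 from by omega,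
        add_assoc]
    · by_cases hr : a = "remove"
      · by_cases hc0 : c = 0
        · subst hc0
          simp [pvGoA, pvAcc, pvDelta, hr]
        · simp only [pvGoA, pvAcc, pvDelta, hr, if_neg hc0,
            List.all_cons, List.map_cons, List.sum_cons]
          have h3 : c - 1 = c + -1 := by ring
          rw [h3] at *
          simp [ih (c + -1) (by omega : (0:Int) ≤ c + -1), show (0:Int) ≤ c + -1 from by omega,
            add_assoc]
      · simp only [pvGoA, pvAcc, pvDelta, if_neg ha, if_neg hr, List.all_cons, List.map_cons,
          List.sum_cons]
        simp [ih c hc, hc]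

theorem alt_eq (actions : List String) :
    validate_nft_actions_alt actions
      = ((pvAcc 0 actions).all (fun p => decide (0 ≤ p)) && (0 + (actions.map pvDelta).sum == 0)) := by
  cases actions with
  | nil => simp [validate_nft_actions_alt, pvAcc]
  | cons a rest =>
    have hne : (a :: rest : List String) ≠ [] := by simp
    have hpre : pvAcc 0 (a :: rest) = (0 + pvDelta a) :: pvAcc (0 + pvDelta a) rest := rfl
    show (((0 + pvDelta a) :: pvAcc (0 + pvDelta a) rest).getLastD 0 == 0
        && decide (0 ≤ (pvAcc (0 + pvDelta a) rest).foldl min (0 + pvDelta a)))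
      = ((pvAcc 0 (a :: rest)).all (fun p => decide (0 ≤ p)) && (0 + ((a :: rest).map pvDelta).sum == 0))
    have hlast : ((0 + pvDelta a) :: pvAcc (0 + pvDelta a) rest).getLastD 0
        = 0 + ((a :: rest).map pvDelta).sum := by
      rw [← hpre, pvAcc_getLastD _ 0 0 hne]
    have hmin : (decide (0 ≤ (pvAcc (0 + pvDelta a) rest).foldl min (0 + pvDelta a)))
        = ((0 + pvDelta a) :: pvAcc (0 + pvDelta a) rest).all (fun p => decide (0 ≤ p)) := by
      rw [Bool.eq_iff_iff]
      simp only [List.all_cons, foldl_min_nonneg, List.all_eq_true, Bool.and_eq_true,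
        decide_eq_true_eq]
    rw [hlast, hmin, hpre, Bool.and_comm]

-- ===== VERDICT (by name: the statement is the Claim_ definition above) =====
theorem validate_nft_actions_spec : Claim_equal_validate_nft_actions := by
  intro actions _
  unfold Spec_validate_nft_actions validate_nft_actions
  rw [pvGoA_key actions 0 le_rfl, alt_eq]
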